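-- pv_equiv track=rewrite | github.com/supathdhitalGEO/FIMserv | src/fimserve/streamflowdata/forecasteddata.py | adjust_hour
-- ===== SOURCE A (Python) =====
-- def adjust_hour(hour, forecast_range):
--     hour = int(hour)
--     if forecast_range == "shortrange":
--         return min(max(hour, 0), 23)
--     elif forecast_range == "mediumrange":
--         valid_hours = [0, 3, 6, 9, 12, 15, 18, 21]
--     elif forecast_range == "longrange":
--         valid_hours = [0, 6, 12, 18]
--     else:
--         return hour
--     adjusted_hour = max([h for h in valid_hours if h <= hour] or [valid_hours[0]])
--     return adjusted_hour
-- ===== SOURCE B (Python) =====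
-- def adjust_hour(hour, forecast_range):
--     hour = int(hour)
--     if forecast_range == "shortrange":
--         return min(max(hour, 0), 23)
--     elif forecast_range == "mediumrange":
--         step, maxval = 3, 21
--     elif forecast_range == "longrange":
--         step, maxval = 6, 18
--     else:
--         return hour
--     if hour < 0:
--         return 0
--     return min(hour // step * step, maxval)
-- ===== Notes on version B (the rewrite author's own statement) =====
-- stated objective: simpler
-- what changed: Replaces building a list of valid hours, filtering it and taking max with a closed-form floor-to-grid-and-cap arithmetic (min(hour//step*step, maxval), 0 for negative hours).
import Mathlib
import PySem

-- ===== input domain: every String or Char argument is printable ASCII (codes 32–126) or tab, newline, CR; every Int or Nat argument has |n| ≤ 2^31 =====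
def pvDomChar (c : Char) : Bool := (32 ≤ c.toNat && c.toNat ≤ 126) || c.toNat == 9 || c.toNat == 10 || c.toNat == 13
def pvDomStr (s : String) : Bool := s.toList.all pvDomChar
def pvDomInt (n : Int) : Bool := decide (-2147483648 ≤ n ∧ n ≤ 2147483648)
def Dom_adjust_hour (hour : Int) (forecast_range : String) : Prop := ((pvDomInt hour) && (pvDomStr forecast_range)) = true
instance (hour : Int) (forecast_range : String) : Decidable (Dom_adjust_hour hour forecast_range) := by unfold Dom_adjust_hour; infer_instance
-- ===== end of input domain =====

-- B replaces the valid-hours list, filter and max scan with closed-form floor-to-grid-and-cap arithmetic (simpler).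

-- ===== PORT A =====
def adjust_hour (hour : Int) (forecast_range : String) : Int :=
  if forecast_range = "shortrange" then
    min (max hour 0) 23
  else if forecast_range = "mediumrange" then
    let valid_hours : List Int := [0, 3, 6, 9, 12, 15, 18, 21]
    let cand := valid_hours.filter (fun h => decide (h ≤ hour))
    ((if cand.isEmpty then [valid_hours.headD 0] else cand).max?).getD 0
  else if forecast_range = "longrange" then
    let valid_hours : List Int := [0, 6, 12, 18]
    let cand := valid_hours.filter (fun h => decide (h ≤ hour))
    ((if cand.isEmpty then [valid_hours.headD 0] else cand).max?).getD 0
  else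
    hour

-- ===== PORT B =====
def adjust_hour_alt (hour : Int) (forecast_range : String) : Int :=
  if forecast_range = "shortrange" then
    min (max hour 0) 23
  else if forecast_range = "mediumrange" then
    if hour < 0 then 0 else min (PySem.Int.floordiv hour 3 * 3) 21
  else if forecast_range = "longrange" then
    if hour < 0 then 0 else min (PySem.Int.floordiv hour 6 * 6) 18
  else
    hour

-- ===== PRECONDITION & SPEC =====
def Spec_adjust_hour (hour : Int) (forecast_range : String) (out : Int) : Prop := out = adjust_hour_alt hour forecast_range
instance (hour : Int) (forecast_range : String) (out : Int) : Decidable (Spec_adjust_hour hour forecast_range out) := by unfold Spec_adjust_hour; infer_instance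

-- ===== CLAIM (what is proved, stated in full; the proofs are below) =====
def Claim_equal_adjust_hour : Prop := ∀ (hour : Int) (forecast_range : String), Dom_adjust_hour hour forecast_range → Spec_adjust_hour hour forecast_range (adjust_hour hour forecast_range)

-- ===== LEMMAS AND PROOFS =====

lemma med_eq (hour : Int) :
    ((if (([0, 3, 6, 9, 12, 15, 18, 21] : List Int).filter (fun h => decide (h ≤ hour))).isEmpty
        then [(([0, 3, 6, 9, 12, 15, 18, 21] : List Int)).headD 0]
        else (([0, 3, 6, 9, 12, 15, 18, 21] : List Int).filter (fun h => decide (h ≤ hour)))).max?).getD 0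
      = (if hour < 0 then 0 else min (PySem.Int.floordiv hour 3 * 3) 21) := by
  rw [PySem.Int.floordiv_eq_ediv_of_pos (by norm_num)]
  rcases lt_or_ge hour 0 with h | h
  · simp [List.filter, show ¬((0:Int) ≤ hour) by omega, show ¬((3:Int) ≤ hour) by omega,
      show ¬((6:Int) ≤ hour) by omega, show ¬((9:Int) ≤ hour) by omega,
      show ¬((12:Int) ≤ hour) by omega, show ¬((15:Int) ≤ hour) by omega,
      show ¬((18:Int) ≤ hour) by omega, show ¬((21:Int) ≤ hour) by omega, h]
  · have h3 : hour / 3 * 3 ≤ hour ∧ hour - 2 ≤ hour / 3 * 3 := by omega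
    rcases lt_or_ge hour 3 with h1 | h1
    · simp [List.filter, h, show ¬((3:Int) ≤ hour) by omega, show ¬((6:Int) ≤ hour) by omega,
        show ¬((9:Int) ≤ hour) by omega, show ¬((12:Int) ≤ hour) by omega,
        show ¬((15:Int) ≤ hour) by omega, show ¬((18:Int) ≤ hour) by omega,
        show ¬((21:Int) ≤ hour) by omega, show ¬(hour < 0) by omega]
      omega
    · rcases lt_or_ge hour 6 with h2 | h2
      · simp [List.filter, h, h1, show ¬((6:Int) ≤ hour) by omega, show ¬((9:Int) ≤ hour) by omega,
          show ¬((12:Int) ≤ hour) by omega, show ¬((15:Int) ≤ hour) by omega,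
          show ¬((18:Int) ≤ hour) by omega, show ¬((21:Int) ≤ hour) by omega,
          show ¬(hour < 0) by omega]
        omega
      · rcases lt_or_ge hour 9 with h4 | h4
        · simp [List.filter, h, h1, h2, show ¬((9:Int) ≤ hour) by omega,
            show ¬((12:Int) ≤ hour) by omega, show ¬((15:Int) ≤ hour) by omega,
            show ¬((18:Int) ≤ hour) by omega, show ¬((21:Int) ≤ hour) by omega,
            show ¬(hour < 0) by omega]
          omega
        · rcases lt_or_ge hour 12 with h5 | h5
          · simp [List.filter, h, h1, h2, h4, show ¬((12:Int) ≤ hour) by omega,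
              show ¬((15:Int) ≤ hour) by omega, show ¬((18:Int) ≤ hour) by omega,
              show ¬((21:Int) ≤ hour) by omega, show ¬(hour < 0) by omega]
            omega
          · rcases lt_or_ge hour 15 with h6 | h6
            · simp [List.filter, h, h1, h2, h4, h5, show ¬((15:Int) ≤ hour) by omega,
                show ¬((18:Int) ≤ hour) by omega, show ¬((21:Int) ≤ hour) by omega,
                show ¬(hour < 0) by omega]
              omega
            · rcases lt_or_ge hour 18 with h7 | h7
              · simp [List.filter, h, h1, h2, h4, h5, h6, show ¬((18:Int) ≤ hour) by omega,
                  show ¬((21:Int) ≤ hour) by omega, show ¬(hour < 0) by omega]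
                omega
              · rcases lt_or_ge hour 21 with h8 | h8
                · simp [List.filter, h, h1, h2, h4, h5, h6, h7,
                    show ¬((21:Int) ≤ hour) by omega, show ¬(hour < 0) by omega]
                  omega
                · simp [List.filter, h, h1, h2, h4, h5, h6, h7, h8, show ¬(hour < 0) by omega]
                  omega

lemma long_eq (hour : Int) :
    ((if (([0, 6, 12, 18] : List Int).filter (fun h => decide (h ≤ hour))).isEmpty
        then [(([0, 6, 12, 18] : List Int)).headD 0]
        else (([0, 6, 12, 18] : List Int).filter (fun h => decide (h ≤ hour)))).max?).getD 0
      = (if hour < 0 then 0 else min (PySem.Int.floordiv hour 6 * 6) 18) := by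
  rw [PySem.Int.floordiv_eq_ediv_of_pos (by norm_num)]
  rcases lt_or_ge hour 0 with h | h
  · simp [List.filter, show ¬((0:Int) ≤ hour) by omega, show ¬((6:Int) ≤ hour) by omega,
      show ¬((12:Int) ≤ hour) by omega, show ¬((18:Int) ≤ hour) by omega, h]
  · have h6 : hour / 6 * 6 ≤ hour ∧ hour - 5 ≤ hour / 6 * 6 := by omega
    rcases lt_or_ge hour 6 with h1 | h1
    · simp [List.filter, h, show ¬((6:Int) ≤ hour) by omega, show ¬((12:Int) ≤ hour) by omega,
        show ¬((18:Int) ≤ hour) by omega, show ¬(hour < 0) by omega]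
      omega
    · rcases lt_or_ge hour 12 with h2 | h2
      · simp [List.filter, h, h1, show ¬((12:Int) ≤ hour) by omega,
          show ¬((18:Int) ≤ hour) by omega, show ¬(hour < 0) by omega]
        omega
      · rcases lt_or_ge hour 18 with h3 | h3
        · simp [List.filter, h, h1, h2, show ¬((18:Int) ≤ hour) by omega,
            show ¬(hour < 0) by omega]
          omega
        · simp [List.filter, h, h1, h2, h3, show ¬(hour < 0) by omega]
          omega

-- ===== VERDICT (by name: the statement is the Claim_ definition above) =====
theorem adjust_hour_spec : Claim_equal_adjust_hour := by
  intro hour fr _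
  unfold Spec_adjust_hour adjust_hour adjust_hour_alt
  by_cases h1 : fr = "shortrange"
  · simp [h1]
  · by_cases h2 : fr = "mediumrange"
    · subst h2
      rw [if_neg (by decide), if_pos rfl, if_neg (by decide), if_pos rfl]
      exact med_eq hour
    · by_cases h3 : fr = "longrange"
      · subst h3
        rw [if_neg (by decide), if_neg (by decide), if_pos rfl,
            if_neg (by decide), if_neg (by decide), if_pos rfl]
        exact long_eq hour
      · simp [h1, h2, h3]
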